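-- pv_equiv track=rewrite | github.com/Ishanbhatia98/codechef | april_challenge_2021_div3/SDICE.py | f
-- ===== SOURCE A (Python) =====
-- def f(n):
--     if n <= 0:
--         return 0
--     if n == 1:
--         return 20
--     if n == 2:
--         return 36
--     if n == 3:
--         return 51
--     if n == 4:
--         return 60
--     '''
--     if n == 5:
--         return 76
--     if n == 6:
--         return 88
--     if n == 7:
--         return 99
--     if n == 8:
--         return 104
--     '''
--     r = n//4
--     d = n % 4
--     return 44*r+f(d)+(4-d)*4
-- ===== SOURCE B (Python) =====
-- SMALL = (20, 36, 51)
-- OFFSET = (16, 21, 22, 22)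
--
-- def f(n):
--     if n <= 0:
--         return 0
--     if n <= 3:
--         return SMALL[n - 1]
--     return 11 * n + OFFSET[n % 4]
-- ===== Notes on version B (the rewrite author's own statement) =====
-- stated objective: simpler
-- what changed: Replaces A's quotient-based recursion 44*(n//4)+f(n%4)+(4-n%4)*4 by the algebraically reduced linear formula 11*n + OFFSET[n % 4] (valid for all n >= 4), with a three-entry table for n = 1..3; no recursion and no floor division remain.
import Mathlib
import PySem

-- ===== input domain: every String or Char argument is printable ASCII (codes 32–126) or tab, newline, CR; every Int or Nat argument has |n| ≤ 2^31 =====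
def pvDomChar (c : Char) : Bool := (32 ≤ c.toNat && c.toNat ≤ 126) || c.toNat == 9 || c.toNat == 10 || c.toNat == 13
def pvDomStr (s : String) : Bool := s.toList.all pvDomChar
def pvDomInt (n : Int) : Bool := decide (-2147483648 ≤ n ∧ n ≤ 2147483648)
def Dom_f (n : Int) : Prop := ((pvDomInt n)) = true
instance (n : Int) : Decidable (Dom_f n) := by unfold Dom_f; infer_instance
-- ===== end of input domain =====

-- B replaces A's quotient-based recursion by the reduced linear formula 11*n + OFFSET[n%4] (n ≥ 4) with a small table for n = 1..3 (simpler: no recursion, no division).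


-- ===== PORT A =====
def f (n : Int) : Int :=
  if n ≤ 0 then 0
  else if n = 1 then 20
  else if n = 2 then 36
  else if n = 3 then 51
  else if n = 4 then 60
  else
    44 * PySem.Int.floordiv n 4 + f (PySem.Int.mod n 4) + (4 - PySem.Int.mod n 4) * 4
termination_by n.toNat
decreasing_by
  rename_i h0 _ _ _ _
  have h5 : 5 ≤ n := by omega
  have hm : PySem.Int.mod n 4 = n % 4 := PySem.Int.mod_eq_emod_of_pos (by omega)
  have : 0 ≤ n % 4 := Int.emod_nonneg n (by norm_num)
  have : n % 4 < 4 := Int.emod_lt_of_pos n (by norm_num)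
  rw [hm]; omega

-- ===== PORT B =====
def pvSMALL : List Int := [20, 36, 51]
def pvOFFSET : List Int := [16, 21, 22, 22]

def f_alt (n : Int) : Int :=
  if n ≤ 0 then 0
  else if n ≤ 3 then
    -- SMALL[n-1]: n ∈ {1,2,3} here, so pyGet? is always `some`; getD 0 is exact
    (PySem.List.pyGet? pvSMALL (n - 1)).getD 0
  else
    -- OFFSET[n % 4]: index in {0,1,2,3}, always `some`
    11 * n + (PySem.List.pyGet? pvOFFSET (PySem.Int.mod n 4)).getD 0

-- ===== PRECONDITION & SPEC =====
def Spec_f (n : Int) (out : Int) : Prop := out = f_alt n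
instance (n : Int) (out : Int) : Decidable (Spec_f n out) := by unfold Spec_f; infer_instance

-- ===== CLAIM (what is proved, stated in full; the proofs are below) =====
def Claim_equal_f : Prop := ∀ (n : Int), Dom_f n → Spec_f n (f n)

-- ===== LEMMAS AND PROOFS =====

theorem f_eq_f_alt (n : Int) : f n = f_alt n := by
  by_cases h0 : n ≤ 0
  · rw [f, f_alt]; simp [h0]
  · by_cases h4 : n ≤ 4
    · interval_cases n <;> rw [f, f_alt] <;> decide
    · -- n ≥ 5: A takes the recursive branch, B the linear formula
      have h5 : 5 ≤ n := by omega
      have hfd : PySem.Int.floordiv n 4 = n / 4 := PySem.Int.floordiv_eq_ediv_of_pos (by norm_num)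
      have hmd : PySem.Int.mod n 4 = n % 4 := PySem.Int.mod_eq_emod_of_pos (by norm_num)
      have hmlo : 0 ≤ n % 4 := Int.emod_nonneg n (by norm_num)
      have hmhi : n % 4 < 4 := Int.emod_lt_of_pos n (by norm_num)
      have hdm : n / 4 * 4 + n % 4 = n := Int.ediv_mul_add_emod n 4
      rw [f]
      simp only [show ¬ n ≤ 0 from by omega, show n ≠ 1 from by omega,
        show n ≠ 2 from by omega, show n ≠ 3 from by omega, show n ≠ 4 from by omega,
        if_false]
      rw [f_alt]
      simp only [show ¬ n ≤ 0 from by omega, show ¬ n ≤ 3 from by omega, if_false]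
      rw [hfd, hmd]
      have e0 : (PySem.List.pyGet? pvOFFSET (0:Int)).getD 0 = 16 := by decide
      have e1 : (PySem.List.pyGet? pvOFFSET (1:Int)).getD 0 = 21 := by decide
      have e2 : (PySem.List.pyGet? pvOFFSET (2:Int)).getD 0 = 22 := by decide
      have e3 : (PySem.List.pyGet? pvOFFSET (3:Int)).getD 0 = 22 := by decide
      have g0 : f 0 = 0 := by rw [f]; decide
      have g1 : f 1 = 20 := by rw [f]; decide
      have g2 : f 2 = 36 := by rw [f]; decide
      have g3 : f 3 = 51 := by rw [f]; decide
      interval_cases h : (n % 4) <;> simp only [e0, e1, e2, e3, g0, g1, g2, g3] <;> omega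

-- ===== VERDICT (by name: the statement is the Claim_ definition above) =====
theorem f_spec : Claim_equal_f := by
  intro n _
  exact f_eq_f_alt n
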